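-- pv_equiv track=rewrite | github.com/kevinmarquesp/html2pdf_pyscript | data_to_html.py | converter_para_matriz
-- ===== SOURCE A (Python) =====
-- def converter_para_matriz(lista_num, colunas_pp=2, fichas_pc=3, celulas_pf=4):
--     """Converte uma lista de números para uma matríz compatível com as funções
--     que convertem esse tipo de matríz num arquivo HTML convertível para PDF.
--     É importante que as regras de como esses números já sejam pre definidas
--     direto na variável lista_num, isso só vai mudar as coisas de lugar e criar
--     sub listas, nenhuma verificação será tomada!
--
--     :param list[int] lista_num:
--         Lista com os valores aleatórios de cada célula pra cada ficha.
--     :param int colunas_pp: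
--         Variável de configuração, quantas colunas cada página (colunas por
--         página) deve ter no HTML final. O padrão é 2.
--     :param int fichas_pc:
--         Variável de configuração, quantas fichas cada coluna (fichar por
--         coluna) deve ter em cada página. O padrão é 3.
--     :param int celulas_pf:
--         Variável de configuração, quantas células cada ficha (células por
--         ficha) deve ter no HTML final. O padrão é 4.
--
--     :returns list[list[list[tuple[int]]]]:
--         Uma matríz multidimensional; Lista de páginas, que são listas de
--         fichas, que são lista de células que são tuplas de números.
--     """
--     celulas_pp = colunas_pp * fichas_pc * celulas_pf
--     total_paginas = (len(lista_num) + celulas_pp - 1) // celulas_pp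
--     resultado = []
--
--     for pagina in range(total_paginas):
--         pagina_atual = []
--
--         for coluna in range(colunas_pp):
--             coluna_atual = []
--
--             for ficha in range(fichas_pc):
--                 ficha_atual = []
--
--                 for celula in range(celulas_pf):
--                     indice = pagina * celulas_pp + coluna * fichas_pc\
--                         * celulas_pf + ficha * celulas_pf + celula
--
--                     if indice < len(lista_num):
--                         ficha_atual.append(lista_num[indice])
--                     else:
--                         ficha_atual.append(None)
--
--                 celulas_ficha = tuple(ficha_atual)
--
--                 coluna_atual.append((None, None, None, None)
--                                     if None in celulas_ficha
--                                     else celulas_ficha)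
--
--             pagina_atual.append(coluna_atual)
--
--         resultado.append(pagina_atual)
--
--     return resultado
-- ===== SOURCE B (Python) =====
-- def _fatiar(xs, k):
--     """Divide xs em fatias consecutivas de tamanho k."""
--     return [xs[i:i + k] for i in range(0, len(xs), k)]
--
--
-- def _colapsar(ficha):
--     t = tuple(ficha)
--     return (None, None, None, None) if None in t else t
--
--
-- def converter_para_matriz(lista_num, colunas_pp=2, fichas_pc=3, celulas_pf=4):
--     celulas_pp = colunas_pp * fichas_pc * celulas_pf
--     total_paginas = (len(lista_num) + celulas_pp - 1) // celulas_pp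
--     faltam = total_paginas * celulas_pp - len(lista_num)
--     padded = list(lista_num) + [None] * faltam
--     fichas = [_colapsar(f) for f in _fatiar(padded, celulas_pf)]
--     colunas = _fatiar(fichas, fichas_pc)
--     return _fatiar(colunas, colunas_pp)
-- ===== Notes on version B (the rewrite author's own statement) =====
-- stated objective: simpler
-- what changed: Instead of four nested index-arithmetic loops, B pads the list with None up to a whole number of pages and then slices it three times into fichas, columns and pages by consecutive chunking.
-- outside the precondition, e.g. on converter_para_matriz([1], -1, -1, 1): A returns [[]], B returns []; on converter_para_matriz([1], 2, 3, -4): A returns [[[(), (), ()], [(), (), ()]]], B returns []; on converter_para_matriz([1, 2], 2, 0, 4): A raises ZeroDivisionError, B raises ZeroDivisionError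
import Mathlib
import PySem

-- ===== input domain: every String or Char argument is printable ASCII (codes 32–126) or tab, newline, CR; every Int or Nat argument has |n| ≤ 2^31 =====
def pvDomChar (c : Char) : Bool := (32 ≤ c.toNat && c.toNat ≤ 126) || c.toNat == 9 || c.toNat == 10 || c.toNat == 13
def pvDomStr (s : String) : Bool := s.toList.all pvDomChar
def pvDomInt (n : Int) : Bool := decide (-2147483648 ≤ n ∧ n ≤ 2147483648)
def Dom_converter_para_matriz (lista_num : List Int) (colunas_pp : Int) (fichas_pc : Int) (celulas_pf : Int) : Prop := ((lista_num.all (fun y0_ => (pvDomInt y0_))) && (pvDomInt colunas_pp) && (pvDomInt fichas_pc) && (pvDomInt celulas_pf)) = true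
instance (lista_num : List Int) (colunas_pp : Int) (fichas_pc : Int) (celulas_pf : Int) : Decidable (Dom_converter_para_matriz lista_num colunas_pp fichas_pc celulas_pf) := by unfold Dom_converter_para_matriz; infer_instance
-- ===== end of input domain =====

-- B replaces A's four nested index-arithmetic loops by padding the list with None
-- to a whole number of pages and chunking it three times (cells→fichas→columns→pages); simpler decomposition, same cost.


-- ===== PORT A =====
-- literal transliteration of A's four nested for-range loops; each append is acc ++ [·];
-- lista_num[indice] is PySem.List.pyGet? (exact; under the guard indice < len the executed
-- indices are always nonnegative, so the cell is exactly Python's value wrapped in `some`)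
def converter_para_matriz (lista_num : List Int) (colunas_pp : Int) (fichas_pc : Int) (celulas_pf : Int) : List (List (List (List (Option Int)))) :=
  let celulas_pp := colunas_pp * fichas_pc * celulas_pf
  let total_paginas := PySem.Int.floordiv (PySem.List.len lista_num + celulas_pp - 1) celulas_pp
  (PySem.List.pyRange 0 total_paginas 1).foldl (fun resultado pagina =>
    resultado ++ [(PySem.List.pyRange 0 colunas_pp 1).foldl (fun pagina_atual coluna =>
      pagina_atual ++ [(PySem.List.pyRange 0 fichas_pc 1).foldl (fun coluna_atual ficha =>
        let ficha_atual := (PySem.List.pyRange 0 celulas_pf 1).foldl (fun ficha_atual celula =>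
          let indice := pagina * celulas_pp + coluna * fichas_pc * celulas_pf + ficha * celulas_pf + celula
          ficha_atual ++ [if indice < PySem.List.len lista_num then PySem.List.pyGet? lista_num indice else none]) []
        coluna_atual ++ [if none ∈ ficha_atual then [none, none, none, none] else ficha_atual]) []]) []]) []

-- ===== PORT B =====
-- _fatiar: [xs[i:i+k] for i in range(0, len(xs), k)]  (exact: pyRange and slice are Python's)
def pvFatiar {α : Type} (xs : List α) (k : Int) : List (List α) :=
  (PySem.List.pyRange 0 (PySem.List.len xs) k).map (fun i => PySem.List.slice xs (some i) (some (i + k)))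

-- _colapsar: (None,None,None,None) if None in tuple(ficha) else tuple(ficha)
def pvColapsar (ficha : List (Option Int)) : List (Option Int) :=
  if none ∈ ficha then [none, none, none, none] else ficha

def converter_para_matriz_alt (lista_num : List Int) (colunas_pp : Int) (fichas_pc : Int) (celulas_pf : Int) : List (List (List (List (Option Int)))) :=
  let celulas_pp := colunas_pp * fichas_pc * celulas_pf
  let total_paginas := PySem.Int.floordiv (PySem.List.len lista_num + celulas_pp - 1) celulas_pp
  let faltam := total_paginas * celulas_pp - PySem.List.len lista_num
  let padded := lista_num.map some ++ List.replicate faltam.toNat (none : Option Int)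
  let fichas := (pvFatiar padded celulas_pf).map pvColapsar
  let colunas := pvFatiar fichas fichas_pc
  pvFatiar colunas colunas_pp

-- ===== PRECONDITION & SPEC =====
-- Pre_ excludes the size configurations with a zero size, on which A raises ZeroDivisionError, and
-- the remaining negative-size configurations, on which A's non-empty output made of empty
-- pages/columns/fichas is an accident of its empty range() loops while B naturally returns [].
def Pre_converter_para_matriz (lista_num : List Int) (colunas_pp : Int) (fichas_pc : Int) (celulas_pf : Int) : Prop :=
  (0 < colunas_pp ∧ 0 < fichas_pc ∧ 0 < celulas_pf)
  ∨ (colunas_pp * fichas_pc * celulas_pf < 0 ∧ 2 ≤ lista_num.length)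
  ∨ (0 < colunas_pp * fichas_pc * celulas_pf ∧ lista_num = [])
instance (lista_num : List Int) (colunas_pp : Int) (fichas_pc : Int) (celulas_pf : Int) : Decidable (Pre_converter_para_matriz lista_num colunas_pp fichas_pc celulas_pf) := by unfold Pre_converter_para_matriz; infer_instance

def pvWitness_converter_para_matriz : List Int × Int × Int × Int := ([1, 2, 3, 4, 5], 2, 3, 4)

def Spec_converter_para_matriz (lista_num : List Int) (colunas_pp : Int) (fichas_pc : Int) (celulas_pf : Int) (out : List (List (List (List (Option Int))))) : Prop := out = converter_para_matriz_alt lista_num colunas_pp fichas_pc celulas_pf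
instance (lista_num : List Int) (colunas_pp : Int) (fichas_pc : Int) (celulas_pf : Int) (out : List (List (List (List (Option Int))))) : Decidable (Spec_converter_para_matriz lista_num colunas_pp fichas_pc celulas_pf out) := by unfold Spec_converter_para_matriz; infer_instance

-- ===== CLAIM (what is proved, stated in full; the proofs are below) =====
def Claim_equal_converter_para_matriz : Prop := ∀ (lista_num : List Int) (colunas_pp : Int) (fichas_pc : Int) (celulas_pf : Int), Dom_converter_para_matriz lista_num colunas_pp fichas_pc celulas_pf → Pre_converter_para_matriz lista_num colunas_pp fichas_pc celulas_pf → Spec_converter_para_matriz lista_num colunas_pp fichas_pc celulas_pf (converter_para_matriz lista_num colunas_pp fichas_pc celulas_pf)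

-- ===== LEMMAS AND PROOFS =====

-- the value A puts in cell number i of the flat enumeration (and B keeps at padded[i])
def pvCell (xs : List Int) (i : Nat) : Option Int :=
  if (i : Int) < PySem.List.len xs then PySem.List.pyGet? xs (i : Int) else none

-- the common nested-map normal form both ports are reduced to (positive sizes)
def pvPages (xs : List Int) (T C F CE : Nat) : List (List (List (List (Option Int)))) :=
  (List.range T).map (fun p => (List.range C).map (fun q => (List.range F).map (fun r =>
    pvColapsar ((List.range CE).map (fun s => pvCell xs (((p * C + q) * F + r) * CE + s))))))

lemma pvFatiar_nil {α : Type} (k : Int) : pvFatiar ([] : List α) k = [] := by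
  unfold pvFatiar
  simp [PySem.List.len_eq, PySem.List.pyRange]

lemma pvFatiar_neg {α : Type} (xs : List α) (k : Int) (hk : k < 0) : pvFatiar xs k = [] := by
  unfold pvFatiar
  rw [PySem.List.len_eq]
  have h1 : k ≠ 0 := by omega
  have h2 : ¬ (0 : Int) < k := by omega
  have h3 : ¬ ((xs.length : Int) < 0) := by omega
  simp [PySem.List.pyRange, h1, h2, h3]

lemma pvFatiar_map_range {α : Type} (g : Nat → α) (m k : Nat) (hk : 0 < k) :
    pvFatiar ((List.range (m * k)).map g) ((k : Nat) : Int)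
      = (List.range m).map (fun j => (List.range k).map (fun s => g (j * k + s))) := by
  unfold pvFatiar
  rw [PySem.List.len_eq, List.length_map, List.length_range]
  rw [PySem.List.pyRange_of_pos _ _ (by exact_mod_cast hk : (0 : Int) < (k : Int))]
  have hcount : (if (0 : Int) < ((m * k : Nat) : Int)
      then ((((m * k : Nat) : Int) - 0 + (k : Int) - 1) / (k : Int)).toNat else 0) = m := by
    by_cases hm : 0 < m * k
    · rw [if_pos (by exact_mod_cast hm)]
      have hdiv : (((m * k : Nat) : Int) - 0 + (k : Int) - 1) / (k : Int) = (m : Int) := by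
        have h1 : (((m * k : Nat) : Int) - 0 + (k : Int) - 1) = ((k : Int) - 1) + (m : Int) * (k : Int) := by
          push_cast; ring
        rw [h1, Int.add_mul_ediv_right _ _ (by exact_mod_cast hk.ne' : (k : Int) ≠ 0)]
        rw [Int.ediv_eq_zero_of_lt (by omega) (by omega)]
        ring
      rw [hdiv]; omega
    · have hm0 : m = 0 := by
        rcases Nat.eq_zero_or_pos m with h | h
        · exact h
        · exact absurd (Nat.mul_pos h hk) hm
      subst hm0; simp
  rw [hcount, List.map_map]
  apply List.map_congr_left
  intro j hj
  rw [List.mem_range] at hj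
  simp only [Function.comp_apply, zero_add]
  have e1 : (k : Int) * (j : Int) = ((j * k : Nat) : Int) := by push_cast; ring
  rw [e1]
  rw [show ((j * k : Nat) : Int) + (k : Int) = ((j * k + k : Nat) : Int) by push_cast; ring]
  rw [PySem.List.slice_natCast]
  have hje : j * k + k ≤ m * k := by
    have h1 := Nat.mul_le_mul_right k (by omega : j + 1 ≤ m)
    have h2 : (j + 1) * k = j * k + k := by ring
    omega
  rw [show j * k + k - j * k = k from by omega]
  rw [← List.map_drop]
  have hdrop : List.drop (j * k) (List.range (m * k))
      = (List.range (m * k - j * k)).map (fun s => j * k + s) := by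
    rw [show m * k = j * k + (m * k - j * k) from by omega, List.range_add]
    rw [show j * k + (m * k - j * k) - j * k = m * k - j * k from by omega]
    rw [List.drop_append_of_le_length (by simp)]
    simp
  rw [hdrop, List.map_map, ← List.map_take, List.take_range]
  rw [show min k (m * k - j * k) = k from by omega]
  simp [Function.comp_def]

lemma pvPadded_eq (xs : List Int) (N : Nat) (hle : xs.length ≤ N) :
    xs.map some ++ List.replicate (N - xs.length) (none : Option Int)
      = (List.range N).map (pvCell xs) := by
  apply List.ext_getElem
  · simp; omega
  · intro i h1 h2
    simp only [List.length_append, List.length_map, List.length_replicate] at h1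
    by_cases hi : i < xs.length
    · rw [List.getElem_append_left (by simpa using hi)]
      simp [pvCell, PySem.List.len, hi]
    · rw [List.getElem_append_right (by simpa using hi)]
      simp only [List.getElem_replicate, List.getElem_map, List.getElem_range]
      simp [pvCell, PySem.List.len]
      omega

-- the number of pages, as both ports compute it (proof-only abbreviation)
def pvT (xs : List Int) (C F CE : Nat) : Nat :=
  (PySem.Int.floordiv ((xs.length : Int) + (C : Int) * (F : Int) * (CE : Int) - 1)
    ((C : Int) * (F : Int) * (CE : Int))).toNat

lemma pvT_cast (xs : List Int) (C F CE : Nat) (hC : 0 < C) (hF : 0 < F) (hCE : 0 < CE) :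
    ((pvT xs C F CE : Nat) : Int)
      = PySem.Int.floordiv ((xs.length : Int) + (C : Int) * (F : Int) * (CE : Int) - 1)
          ((C : Int) * (F : Int) * (CE : Int)) := by
  have hcpp : (0 : Int) < (C : Int) * (F : Int) * (CE : Int) := by positivity
  have h0 : (0 : Int) ≤ PySem.Int.floordiv ((xs.length : Int) + (C : Int) * (F : Int) * (CE : Int) - 1)
      ((C : Int) * (F : Int) * (CE : Int)) := by
    rw [PySem.Int.le_floordiv_iff_mul_le hcpp]
    have : (0 : Int) ≤ (xs.length : Int) := by positivity
    omega
  unfold pvT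
  omega

lemma pvLen_le (xs : List Int) (C F CE : Nat) (hC : 0 < C) (hF : 0 < F) (hCE : 0 < CE) :
    xs.length ≤ pvT xs C F CE * (C * F * CE) := by
  have hcpp : (0 : Int) < (C : Int) * (F : Int) * (CE : Int) := by positivity
  have hbr := (PySem.Int.floordiv_eq_iff_of_pos
    (a := (xs.length : Int) + (C : Int) * (F : Int) * (CE : Int) - 1) hcpp).mp rfl
  have hTc := pvT_cast xs C F CE hC hF hCE
  have hexp : ((PySem.Int.floordiv ((xs.length : Int) + (C : Int) * (F : Int) * (CE : Int) - 1)
      ((C : Int) * (F : Int) * (CE : Int))) + 1) * ((C : Int) * (F : Int) * (CE : Int))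
      = (PySem.Int.floordiv ((xs.length : Int) + (C : Int) * (F : Int) * (CE : Int) - 1)
      ((C : Int) * (F : Int) * (CE : Int))) * ((C : Int) * (F : Int) * (CE : Int))
        + (C : Int) * (F : Int) * (CE : Int) := by ring
  have hI : (xs.length : Int) ≤ ((pvT xs C F CE : Nat) : Int) * ((C : Int) * (F : Int) * (CE : Int)) := by
    rw [hTc]; omega
  have hcast : ((pvT xs C F CE * (C * F * CE) : Nat) : Int)
      = ((pvT xs C F CE : Nat) : Int) * ((C : Int) * (F : Int) * (CE : Int)) := by push_cast; ring
  exact_mod_cast hcast ▸ hI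

lemma pvCell_eq (xs : List Int) (C F CE p q r s : Nat) :
    (if (p : Int) * ((C : Int) * (F : Int) * (CE : Int)) + (q : Int) * (F : Int) * (CE : Int)
        + (r : Int) * (CE : Int) + (s : Int) < PySem.List.len xs
      then PySem.List.pyGet? xs ((p : Int) * ((C : Int) * (F : Int) * (CE : Int))
        + (q : Int) * (F : Int) * (CE : Int) + (r : Int) * (CE : Int) + (s : Int))
      else none)
      = pvCell xs (((p * C + q) * F + r) * CE + s) := by
  have hidx : (p : Int) * ((C : Int) * (F : Int) * (CE : Int)) + (q : Int) * (F : Int) * (CE : Int)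
      + (r : Int) * (CE : Int) + (s : Int)
      = ((((p * C + q) * F + r) * CE + s : Nat) : Int) := by push_cast; ring
  unfold pvCell
  rw [hidx]

lemma pvA_eq (xs : List Int) (C F CE : Nat) (hC : 0 < C) (hF : 0 < F) (hCE : 0 < CE) :
    converter_para_matriz xs (C : Int) (F : Int) (CE : Int) = pvPages xs (pvT xs C F CE) C F CE := by
  unfold converter_para_matriz pvPages
  simp only [PySem.List.foldl_append_singleton_eq_map, List.nil_append]
  have hT' : PySem.Int.floordiv (PySem.List.len xs + (C : Int) * (F : Int) * (CE : Int) - 1)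
      ((C : Int) * (F : Int) * (CE : Int)) = ((pvT xs C F CE : Nat) : Int) := by
    rw [PySem.List.len_eq, pvT_cast xs C F CE hC hF hCE]
  rw [hT']
  simp only [PySem.List.pyRange_zero_natCast, List.map_map, Function.comp_def]
  apply List.map_congr_left; intro p _
  apply List.map_congr_left; intro q _
  apply List.map_congr_left; intro r _
  have hc2 := List.map_congr_left (l := List.range CE)
    (f := fun s : Nat => if (p : Int) * ((C : Int) * (F : Int) * (CE : Int))
        + (q : Int) * (F : Int) * (CE : Int) + (r : Int) * (CE : Int) + (s : Int) < PySem.List.len xs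
      then PySem.List.pyGet? xs ((p : Int) * ((C : Int) * (F : Int) * (CE : Int))
        + (q : Int) * (F : Int) * (CE : Int) + (r : Int) * (CE : Int) + (s : Int))
      else none)
    (g := fun s : Nat => pvCell xs (((p * C + q) * F + r) * CE + s))
    (fun s _ => pvCell_eq xs C F CE p q r s)
  rw [hc2]
  simp [pvColapsar]

lemma pvB_eq (xs : List Int) (C F CE : Nat) (hC : 0 < C) (hF : 0 < F) (hCE : 0 < CE) :
    converter_para_matriz_alt xs (C : Int) (F : Int) (CE : Int) = pvPages xs (pvT xs C F CE) C F CE := by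
  unfold converter_para_matriz_alt
  simp only [PySem.List.len_eq]
  rw [← pvT_cast xs C F CE hC hF hCE]
  have hcast : ((pvT xs C F CE * (C * F * CE) : Nat) : Int)
      = ((pvT xs C F CE : Nat) : Int) * ((C : Int) * (F : Int) * (CE : Int)) := by push_cast; ring
  have hfal : ((((pvT xs C F CE : Nat) : Int) * ((C : Int) * (F : Int) * (CE : Int))
      - (xs.length : Int))).toNat = pvT xs C F CE * (C * F * CE) - xs.length := by
    rw [← hcast]; omega
  rw [hfal]
  rw [pvPadded_eq xs (pvT xs C F CE * (C * F * CE)) (pvLen_le xs C F CE hC hF hCE)]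
  rw [show pvT xs C F CE * (C * F * CE) = pvT xs C F CE * C * F * CE by ring]
  rw [pvFatiar_map_range (pvCell xs) (pvT xs C F CE * C * F) CE hCE]
  rw [List.map_map]
  rw [pvFatiar_map_range _ (pvT xs C F CE * C) F hF]
  rw [pvFatiar_map_range _ (pvT xs C F CE) C hC]
  simp [pvPages]

lemma pvPyRange_one_nonpos {b : Int} (hb : b ≤ 0) : PySem.List.pyRange 0 b 1 = [] := by
  rw [PySem.List.pyRange_of_pos _ _ (by omega : (0 : Int) < 1),
    if_neg (show ¬ ((0 : Int) < b) from by omega)]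
  simp

-- A returns [] as soon as the computed number of pages is ≤ 0
lemma pvA_degenerate (xs : List Int) (c f ce : Int)
    (h : PySem.Int.floordiv ((xs.length : Int) + c * f * ce - 1) (c * f * ce) ≤ 0) :
    converter_para_matriz xs c f ce = [] := by
  unfold converter_para_matriz
  simp only [PySem.List.len_eq]
  rw [pvPyRange_one_nonpos h]
  rfl

-- B returns [] as soon as one of the three sizes is negative
lemma pvB_degenerate (xs : List Int) (c f ce : Int) (h : c < 0 ∨ f < 0 ∨ ce < 0) :
    converter_para_matriz_alt xs c f ce = [] := by
  unfold converter_para_matriz_alt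
  simp only [PySem.List.len_eq]
  rcases h with hc | hf | hce
  · rw [pvFatiar_neg _ _ hc]
  · rw [pvFatiar_neg _ _ hf, pvFatiar_nil]
  · rw [pvFatiar_neg _ _ hce]
    simp only [List.map_nil]
    rw [pvFatiar_nil, pvFatiar_nil]

-- ===== VERDICT (by name: the statement is the Claim_ definition above) =====
theorem converter_para_matriz_spec : Claim_equal_converter_para_matriz := by
  intro lista_num colunas_pp fichas_pc celulas_pf _ hpre
  unfold Spec_converter_para_matriz
  rcases hpre with ⟨hc, hf, hce⟩ | ⟨hneg, hlen⟩ | ⟨hpos, hnil⟩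
  · -- positive sizes: both ports equal the nested-map normal form
    lift colunas_pp to ℕ using hc.le with C
    lift fichas_pc to ℕ using hf.le with F
    lift celulas_pf to ℕ using hce.le with CE
    have hC : 0 < C := by exact_mod_cast hc
    have hF : 0 < F := by exact_mod_cast hf
    have hCE : 0 < CE := by exact_mod_cast hce
    rw [pvA_eq lista_num C F CE hC hF hCE, pvB_eq lista_num C F CE hC hF hCE]
  · -- negative cell total with at least 2 numbers: the page count is ≤ 0, both return []
    have hsome : colunas_pp < 0 ∨ fichas_pc < 0 ∨ celulas_pf < 0 := by
      by_contra hco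
      rw [not_or, not_or] at hco
      obtain ⟨h1, h2⟩ := hco
      obtain ⟨h2, h3⟩ := h2
      exact absurd (mul_nonneg (mul_nonneg (by omega : (0:Int) ≤ colunas_pp) (by omega : (0:Int) ≤ fichas_pc)) (by omega : (0:Int) ≤ celulas_pf)) (not_le.mpr hneg)
    have htot : PySem.Int.floordiv ((lista_num.length : Int)
        + colunas_pp * fichas_pc * celulas_pf - 1) (colunas_pp * fichas_pc * celulas_pf) ≤ 0 := by
      set cpp := colunas_pp * fichas_pc * celulas_pf with hcpp
      set a := (lista_num.length : Int) + cpp - 1 with ha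
      have hmul := PySem.Int.floordiv_mul_add_mod a cpp
      have hmod := PySem.Int.mod_neg_bounds (a := a) hneg
      by_contra hco
      have h1 : 1 ≤ PySem.Int.floordiv a cpp := by omega
      have h2 : PySem.Int.floordiv a cpp * cpp ≤ 1 * cpp :=
        mul_le_mul_of_nonpos_right h1 (by omega)
      have hlen' : (2 : Int) ≤ (lista_num.length : Int) := by exact_mod_cast hlen
      omega
    rw [pvA_degenerate _ _ _ _ htot, pvB_degenerate _ _ _ _ hsome]
  · -- positive cell total with an empty list: zero pages, both return []
    subst hnil
    have htot0 : PySem.Int.floordiv ((0 : Int)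
        + colunas_pp * fichas_pc * celulas_pf - 1) (colunas_pp * fichas_pc * celulas_pf) = 0 :=
      (PySem.Int.floordiv_eq_iff_of_pos hpos).mpr ⟨by omega, by omega⟩
    have htot : PySem.Int.floordiv (((([] : List Int).length) : Int)
        + colunas_pp * fichas_pc * celulas_pf - 1) (colunas_pp * fichas_pc * celulas_pf) = 0 := by
      simpa using htot0
    rw [pvA_degenerate _ _ _ _ (le_of_eq htot)]
    unfold converter_para_matriz_alt
    simp only [PySem.List.len_eq, List.length_nil, Nat.cast_zero, htot0, zero_mul, sub_zero,
      Int.toNat_zero, List.replicate_zero, List.map_nil, List.nil_append]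
    rw [pvFatiar_nil]
    simp only [List.map_nil]
    rw [pvFatiar_nil, pvFatiar_nil]
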